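-- pv_equiv track=rewrite | github.com/NewtonGold/Experimenting-with-the-QAOA-on-the-TSP-problem | Code/native_tsp_bqm.py | decode_solution
-- ===== SOURCE A (Python) =====
-- def decode_solution(solution, total_n):
--     # # Define a function to map binary variables to node indices
--     new_solution = {}
--     for i, item in enumerate(solution.items()):
--         new_solution[(i)] = item[1]
--
--     decoded_solution = {}
--     count = 0
--     for i in range(total_n):
--         for j in range(total_n):
--             if i == 0 and j == 0:
--                 decoded_solution[(i, j)] = 1
--             elif i == 0 or j == 0:
--                 decoded_solution[(i, j)] = 0
--             else:
--                 decoded_solution[(i, j)] = new_solution[count]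
--                 count += 1
--
--     return decoded_solution
-- ===== SOURCE B (Python) =====
-- def decode_solution(solution, total_n):
--     # Build the matrix as explicit row lists (border row/column as literals,
--     # interior rows as slices of the value list), then flatten the rows into
--     # the dict with a doubly-enumerated comprehension: no per-cell branching
--     # and no running counter.
--     if total_n <= 0:
--         return {}
--     m = total_n - 1
--     vals = list(solution.values())
--     rows = [[1] + [0] * m] + [[0] + vals[r * m:(r + 1) * m] for r in range(m)]
--     return {(i, j): v for i, row in enumerate(rows) for j, v in enumerate(row)}
-- ===== Notes on version B (the rewrite author's own statement) =====
-- stated objective: alternative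
-- what changed: Instead of A's nested per-cell loop with a three-way branch and a running counter, B constructs the whole matrix as row lists (border row/column as list literals, each interior row as one slice of the value list) and then flattens the rows into the dict with a doubly-enumerated comprehension.
import Mathlib
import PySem

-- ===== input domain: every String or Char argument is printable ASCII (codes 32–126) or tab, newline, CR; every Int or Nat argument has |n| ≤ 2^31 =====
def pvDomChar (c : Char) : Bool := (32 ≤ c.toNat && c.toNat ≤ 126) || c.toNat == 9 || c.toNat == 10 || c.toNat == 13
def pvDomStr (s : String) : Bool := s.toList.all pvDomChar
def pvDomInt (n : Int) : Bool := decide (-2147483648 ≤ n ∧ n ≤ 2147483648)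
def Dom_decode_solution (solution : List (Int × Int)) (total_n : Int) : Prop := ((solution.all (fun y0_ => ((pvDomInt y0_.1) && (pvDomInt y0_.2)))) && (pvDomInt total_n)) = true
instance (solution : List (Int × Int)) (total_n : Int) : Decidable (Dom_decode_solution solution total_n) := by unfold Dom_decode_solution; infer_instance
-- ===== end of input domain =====

-- B builds the matrix as explicit row lists (border row/column as literals, interior
-- rows as slices of the value list) and flattens them into the dict with a doubly
-- enumerated comprehension, instead of A's branch-per-cell loop with a running
-- counter (objective: alternative).

-- ===== PORT A =====
def decode_solution (solution : List (Int × Int)) (total_n : Int) : List (Int × Int × Int) :=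
  let new_solution : PySem.Dict Int Int :=
    (PySem.List.enumerate solution 0).foldl (fun d p => d.insert p.1 p.2.2) PySem.Dict.empty
  let res :=
    (PySem.List.pyRange 0 total_n 1).foldl
      (fun (st : PySem.Dict (Int × Int) Int × Int) i =>
        (PySem.List.pyRange 0 total_n 1).foldl
          (fun (st : PySem.Dict (Int × Int) Int × Int) j =>
            if i = 0 ∧ j = 0 then (st.1.insert (i, j) 1, st.2)
            else if i = 0 ∨ j = 0 then (st.1.insert (i, j) 0, st.2)
            -- new_solution[count]: KeyError when count ≥ len(solution) — excluded by Pre_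
            else (st.1.insert (i, j) (new_solution.getD st.2 0), st.2 + 1))
          st)
      (PySem.Dict.empty, 0)
  res.1.items.map (fun p => (p.1.1, p.1.2, p.2))

-- ===== PORT B =====
def decode_solution_alt (solution : List (Int × Int)) (total_n : Int) : List (Int × Int × Int) :=
  if total_n ≤ 0 then []
  else
    let m := total_n - 1
    let vals := (PySem.Dict.mk solution).values
    let rows : List (List Int) :=
      ([1] ++ PySem.List.pyRepeat [0] m) ::
        (PySem.List.pyRange 0 m 1).map
          -- vals[r*m:(r+1)*m]: Python slices clamp, never raise; under Pre_ the slice is full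
          (fun r => [0] ++ PySem.List.slice vals (some (r * m)) (some ((r + 1) * m)))
    let decoded : PySem.Dict (Int × Int) Int :=
      (PySem.List.enumerate rows 0).foldl
        (fun d p =>
          (PySem.List.enumerate p.2 0).foldl (fun d q => d.insert (p.1, q.1) q.2) d)
        PySem.Dict.empty
    decoded.items.map (fun p => (p.1.1, p.1.2, p.2))

-- ===== PRECONDITION & SPEC =====
-- Pre_ excludes exactly the inputs where A raises KeyError: total_n ≥ 2 with fewer
-- than (total_n-1)^2 solution entries.
def Pre_decode_solution (solution : List (Int × Int)) (total_n : Int) : Prop :=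
  total_n ≤ 1 ∨ (total_n - 1) * (total_n - 1) ≤ (solution.length : Int)
instance (solution : List (Int × Int)) (total_n : Int) : Decidable (Pre_decode_solution solution total_n) := by unfold Pre_decode_solution; infer_instance
def pvWitness_decode_solution : (List (Int × Int)) × Int := ([(0, 1)], 2)

def Spec_decode_solution (solution : List (Int × Int)) (total_n : Int) (out : List (Int × Int × Int)) : Prop := out = decode_solution_alt solution total_n
instance (solution : List (Int × Int)) (total_n : Int) (out : List (Int × Int × Int)) : Decidable (Spec_decode_solution solution total_n out) := by unfold Spec_decode_solution; infer_instance

-- ===== CLAIM (what is proved, stated in full; the proofs are below) =====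
def Claim_equal_decode_solution : Prop := ∀ (solution : List (Int × Int)) (total_n : Int), Dom_decode_solution solution total_n → Pre_decode_solution solution total_n → Spec_decode_solution solution total_n (decode_solution solution total_n)

-- ===== LEMMAS AND PROOFS =====

-- ---- A-side characterisation: the nested loop builds row-major pairs ----

def pvValA (new : PySem.Dict Int Int) (i c j : Int) : Int :=
  if i = 0 ∧ j = 0 then 1 else if i = 0 ∨ j = 0 then 0 else new.getD (c + j - 1) 0

def pvCntA (i : Int) (k : Nat) : Int := if i = 0 then 0 else max ((k : Int) - 1) 0

def pvStart (N r : Int) : Int := if r = 0 then 0 else (r - 1) * (N - 1)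

def pvRowA (new : PySem.Dict Int Int) (N r : Int) : List ((Int × Int) × Int) :=
  (PySem.List.pyRange 0 N 1).map (fun j => ((r, j), pvValA new r (pvStart N r) j))

def pvGridA (new : PySem.Dict Int Int) (N i : Int) : List ((Int × Int) × Int) :=
  (PySem.List.pyRange 0 i 1).flatMap (pvRowA new N)

lemma innerA (new : PySem.Dict Int Int) (i : Int) (d : PySem.Dict (Int × Int) Int) (c : Int)
    (Hd : ∀ j, (i, j) ∉ d.keys) (k : Nat) :
    (PySem.List.pyRange 0 (k : Int) 1).foldl
      (fun (st : PySem.Dict (Int × Int) Int × Int) j =>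
        if i = 0 ∧ j = 0 then (st.1.insert (i, j) 1, st.2)
        else if i = 0 ∨ j = 0 then (st.1.insert (i, j) 0, st.2)
        else (st.1.insert (i, j) (new.getD st.2 0), st.2 + 1)) (d, c)
    = (PySem.Dict.mk (d.items ++ (PySem.List.pyRange 0 (k : Int) 1).map
          (fun j => ((i, j), pvValA new i c j))),
       c + pvCntA i k) := by
  induction k with
  | zero =>
      simp [PySem.List.pyRange, pvCntA]
  | succ k ih =>
      rw [show ((k + 1 : Nat) : Int) = (k : Int) + 1 by push_cast; ring,
          PySem.List.pyRange_one_succ_right (by positivity)]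
      rw [List.foldl_append, ih, List.foldl_cons, List.foldl_nil]
      have hfresh : (PySem.Dict.mk (d.items ++ (PySem.List.pyRange 0 (k : Int) 1).map
          (fun j => ((i, j), pvValA new i c j)))).contains (i, (k : Int)) = false := by
        rw [PySem.Dict.contains_eq_decide_mem_keys]
        simp only [PySem.Dict.keys_mk, List.map_append, List.map_map, decide_eq_false_iff_not,
          List.mem_append, List.mem_map, Function.comp]
        rintro (h | ⟨j, hj, hje⟩)
        · exact Hd _ (by simpa [PySem.Dict.keys] using h)
        · have h2 := (PySem.List.mem_pyRange_one.1 hj).2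
          have : j = (k : Int) := by cases hje; rfl
          omega
      simp only [List.map_append, List.map_cons, List.map_nil]
      have hins : ∀ v : Int,
          (PySem.Dict.mk (d.items ++ (PySem.List.pyRange 0 (k : Int) 1).map
            (fun j => ((i, j), pvValA new i c j)))).insert (i, (k : Int)) v
          = PySem.Dict.mk (d.items ++ ((PySem.List.pyRange 0 (k : Int) 1).map
              (fun j => ((i, j), pvValA new i c j)) ++ [((i, (k : Int)), v)])) := by
        intro v
        apply PySem.Dict.ext
        rw [PySem.Dict.items_insert_of_not_contains _ _ hfresh]
        simp
      split_ifs with h1 h2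
      · rw [hins]
        simp only [Prod.mk.injEq]
        constructor
        · have : pvValA new i c (k : Int) = 1 := by simp [pvValA, h1.1, h1.2]
          rw [this]
        · simp [pvCntA, h1.1]
      · rw [hins]
        simp only [Prod.mk.injEq]
        constructor
        · have : pvValA new i c (k : Int) = 0 := by
            simp only [pvValA, if_neg h1, if_pos h2]
          rw [this]
        · simp only [pvCntA]
          rcases h2 with h2 | h2
          · simp [h2]
          · have hk0 : (k : Int) = 0 := h2
            have : k = 0 := by omega
            subst this
            split <;> simp
      · rw [hins]
        simp only [Prod.mk.injEq]
        have hi : ¬ i = 0 := fun h => h2 (Or.inl h)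
        have hk : ¬ (k : Int) = 0 := fun h => h2 (Or.inr h)
        constructor
        · have hc : c + pvCntA i k = c + (k : Int) - 1 := by
            simp only [pvCntA, if_neg hi]
            omega
          have : pvValA new i c (k : Int) = new.getD (c + (k : Int) - 1) 0 := by
            simp only [pvValA, if_neg h1, if_neg h2]
          rw [this, hc]
        · simp only [pvCntA, if_neg hi]
          omega

lemma gridA_key_lt (new : PySem.Dict Int Int) (N i : Int) (p : (Int × Int) × Int)
    (hp : p ∈ pvGridA new N i) : p.1.1 < i := by
  simp only [pvGridA, pvRowA, List.mem_flatMap, List.mem_map] at hp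
  obtain ⟨r, hr, j, hj, rfl⟩ := hp
  exact (PySem.List.mem_pyRange_one.1 hr).2

lemma outerA (new : PySem.Dict Int Int) (n : Nat) (i : Nat) (hin : i ≤ n) :
    (PySem.List.pyRange 0 (i : Int) 1).foldl
      (fun (st : PySem.Dict (Int × Int) Int × Int) i =>
        (PySem.List.pyRange 0 (n : Int) 1).foldl
          (fun (st : PySem.Dict (Int × Int) Int × Int) j =>
            if i = 0 ∧ j = 0 then (st.1.insert (i, j) 1, st.2)
            else if i = 0 ∨ j = 0 then (st.1.insert (i, j) 0, st.2)
            else (st.1.insert (i, j) (new.getD st.2 0), st.2 + 1)) st)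
      (PySem.Dict.empty, 0)
    = (PySem.Dict.mk (pvGridA new (n : Int) (i : Int)), pvStart (n : Int) (i : Int)) := by
  induction i with
  | zero => simp [PySem.List.pyRange, pvGridA, pvStart, PySem.Dict.empty]
  | succ i ih =>
      rw [show ((i + 1 : Nat) : Int) = (i : Int) + 1 by push_cast; ring,
          PySem.List.pyRange_one_succ_right (by positivity)]
      rw [List.foldl_append, ih (by omega), List.foldl_cons, List.foldl_nil]
      rw [innerA new (i : Int) _ _ (fun j hj => by
        simp only [PySem.Dict.keys, List.mem_map] at hj
        obtain ⟨p, hp, hpe⟩ := hj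
        have hlt := gridA_key_lt new (n : Int) (i : Int) p hp
        rw [hpe] at hlt
        omega) n]
      rw [Prod.mk.injEq]
      constructor
      · congr 1
        show pvGridA new (n:Int) (i:Int) ++ _ = _
        rw [pvGridA, pvGridA, PySem.List.pyRange_one_succ_right (by positivity),
          List.flatMap_append]
        simp [pvRowA]
      · by_cases hi0 : (i : Int) = 0
        · simp [pvStart, hi0, pvCntA]
        · have h1 : 1 ≤ (i : Int) := by omega
          have hn1 : 1 ≤ (n : Int) := by omega
          simp only [pvStart, pvCntA, if_neg hi0, if_neg (by omega : ¬ (i : Int) + 1 = 0)]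
          rw [max_eq_left (by omega)]
          ring

def pvNew (sol : List (Int × Int)) : PySem.Dict Int Int :=
  (PySem.List.enumerate sol 0).foldl (fun d p => d.insert p.1 p.2.2) PySem.Dict.empty

lemma pvNew_items (sol : List (Int × Int)) :
    (pvNew sol).items = (PySem.List.enumerate sol 0).map (fun p => (p.1, p.2.2)) := by
  rw [pvNew, PySem.Dict.items_foldl_insert_fresh (PySem.List.enumerate sol 0)
        (fun p => p.1) (fun p => p.2.2) PySem.Dict.empty
        (fun a _ => PySem.Dict.contains_empty _)
        (by rw [show (fun (p : Int × (Int × Int)) => p.1) = (fun p => p.1) from rfl,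
              PySem.List.map_fst_enumerate]
            exact PySem.List.nodup_pyRange_one 0 _)]
  simp [PySem.Dict.empty]

lemma pvNew_getD (sol : List (Int × Int)) (c : Int) (h0 : 0 ≤ c) (h1 : c < (sol.length : Int)) :
    (pvNew sol).getD c 0 = (sol.map (fun x => x.2)).getD c.toNat 0 := by
  have hk : c.toNat < sol.length := by omega
  have hmem : (c, sol[c.toNat].2) ∈ (pvNew sol).items := by
    rw [pvNew_items]
    have hlen : c.toNat < (PySem.List.enumerate sol 0).length := by
      rw [PySem.List.length_enumerate]; exact hk
    have : ((PySem.List.enumerate sol 0).map (fun p => (p.1, p.2.2)))[c.toNat]'(by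
          simpa using hlen) =
        (c, sol[c.toNat].2) := by
      rw [List.getElem_map, PySem.List.getElem_enumerate]
      have hc : (0 : Int) + (c.toNat : Int) = c := by omega
      rw [hc]
    rw [← this]
    exact List.getElem_mem _
  have hnd : (pvNew sol).keys.Nodup := by
    rw [PySem.Dict.keys, pvNew_items, List.map_map]
    rw [show ((fun (x : Int × Int) => x.1) ∘ (fun (p : Int × (Int × Int)) => (p.1, p.2.2)))
          = fun p => p.1 from rfl, PySem.List.map_fst_enumerate]
    exact PySem.List.nodup_pyRange_one 0 _
  rw [PySem.Dict.getD_of_mem_items _ hmem hnd]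
  rw [List.getD_eq_getElem _ _ (by simpa using hk), List.getElem_map]

-- ---- B-side: each enumerated row appends its pair list ----

def pvRowC (i : Int) (row : List Int) : List ((Int × Int) × Int) :=
  (PySem.List.enumerate row 0).map (fun q => ((i, q.1), q.2))

lemma innerC (i : Int) (row : List Int) (d : PySem.Dict (Int × Int) Int)
    (Hd : ∀ j, (i, j) ∉ d.keys) :
    (PySem.List.enumerate row 0).foldl (fun d q => d.insert (i, q.1) q.2) d
      = PySem.Dict.mk (d.items ++ pvRowC i row) := by
  apply PySem.Dict.ext
  rw [PySem.Dict.items_foldl_insert_fresh (PySem.List.enumerate row 0)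
        (fun q => (i, q.1)) (fun q => q.2) d
        (fun q _ => by
          rw [PySem.Dict.contains_eq_decide_mem_keys]
          exact decide_eq_false (Hd q.1))
        (by
          have : (PySem.List.enumerate row 0).map (fun q => (i, q.1))
              = ((PySem.List.enumerate row 0).map (fun q => q.1)).map (fun j => (i, j)) := by
            rw [List.map_map]; rfl
          rw [this, PySem.List.map_fst_enumerate]
          exact (PySem.List.nodup_pyRange_one 0 _).map (fun a b h => by cases h; rfl))]
  rfl

-- the B-side grid after the header row and k interior rows
def pvGridC (vals : List Int) (m : Int) (k : Nat) : List ((Int × Int) × Int) :=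
  pvRowC 0 ([1] ++ PySem.List.pyRepeat [0] m) ++
    (List.range k).flatMap
      (fun (r : Nat) => pvRowC ((r : Int) + 1)
        ([0] ++ PySem.List.slice vals (some ((r : Int) * m)) (some (((r : Int) + 1) * m))))

lemma gridC_key_le (vals : List Int) (m : Int) (k : Nat) (p : (Int × Int) × Int)
    (hp : p ∈ pvGridC vals m k) : p.1.1 ≤ (k : Int) := by
  simp only [pvGridC] at hp
  rcases List.mem_append.1 hp with h | h
  · simp only [pvRowC] at h
    obtain ⟨q, hq, rfl⟩ := List.mem_map.1 h
    show (0 : Int) ≤ (k : Int)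
    positivity
  · obtain ⟨r, hr, hq⟩ := List.mem_flatMap.1 h
    simp only [pvRowC] at hq
    obtain ⟨q, hq2, rfl⟩ := List.mem_map.1 hq
    have := List.mem_range.1 hr
    show (r : Int) + 1 ≤ (k : Int)
    omega

lemma outerC (vals : List Int) (m : Int) (k : Nat) :
    ((List.range k).map
        (fun (r : Nat) => (((r : Int) + 1),
          [0] ++ PySem.List.slice vals (some ((r : Int) * m)) (some (((r : Int) + 1) * m))))).foldl
      (fun (d : PySem.Dict (Int × Int) Int) p =>
        (PySem.List.enumerate p.2 0).foldl (fun d q => d.insert (p.1, q.1) q.2) d)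
      (PySem.Dict.mk (pvGridC vals m 0))
    = PySem.Dict.mk (pvGridC vals m k) := by
  induction k with
  | zero => simp
  | succ k ih =>
      rw [List.range_succ, List.map_append, List.foldl_append, ih, List.map_cons, List.map_nil,
        List.foldl_cons, List.foldl_nil]
      rw [innerC _ _ _ (fun j hj => by
        simp only [PySem.Dict.keys, List.mem_map] at hj
        obtain ⟨p, hp, hpe⟩ := hj
        have hle := gridC_key_le vals m k p hp
        rw [hpe] at hle
        revert hle
        show ¬ ((k : Int) + 1 ≤ (k : Int))
        omega)]
      congr 1
      rw [pvGridC, pvGridC, List.range_succ, List.flatMap_append, List.flatMap_singleton,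
        List.append_assoc]

-- ---- bridge: B's pair lists are A's rows ----

lemma rowC_zero (new : PySem.Dict Int Int) (n : Nat) (hn : 0 < n) :
    pvRowC 0 ([1] ++ PySem.List.pyRepeat [0] ((n : Int) - 1)) = pvRowA new (n : Int) 0 := by
  have hrep : PySem.List.pyRepeat ([0] : List Int) ((n : Int) - 1)
      = List.replicate (n - 1) (0 : Int) := by
    rw [PySem.List.pyRepeat_singleton]
    congr 1
    omega
  rw [pvRowC, pvRowA, hrep]
  apply List.ext_getElem
  · simp [PySem.List.length_enumerate, PySem.List.length_pyRange_one]
    omega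
  · intro p h1 h2
    have hp : p < n := by
      simp only [List.length_map, PySem.List.length_enumerate, List.length_append,
        List.length_cons, List.length_nil, List.length_replicate] at h1
      omega
    rw [List.getElem_map, List.getElem_map, PySem.List.getElem_enumerate,
      PySem.List.getElem_pyRange_one]
    have hval : ([1] ++ List.replicate (n - 1) (0 : Int))[p]'(by simpa using h1)
        = pvValA new 0 (pvStart (n : Int) 0) ((0 : Int) + (p : Int)) := by
      rcases Nat.eq_zero_or_pos p with hp0 | hp0
      · subst hp0; simp [pvValA]
      · have hgl : ([1] ++ List.replicate (n - 1) (0 : Int))[p]'(by simpa using h1) = 0 := by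
          rw [List.getElem_append_right (by simpa using hp0)]
          exact List.getElem_replicate _
        rw [hgl]
        simp [pvValA, hp0.ne']
    rw [hval]

lemma rowC_interior (sol : List (Int × Int)) (n : Nat) (r : Nat)
    (hr : r < n - 1) (hpre : ((n : Int) - 1) * ((n : Int) - 1) ≤ (sol.length : Int)) :
    pvRowC ((r : Int) + 1)
        ([0] ++ PySem.List.slice (sol.map (fun x => x.2))
          (some ((r : Int) * ((n : Int) - 1))) (some (((r : Int) + 1) * ((n : Int) - 1))))
      = pvRowA (pvNew sol) (n : Int) ((r : Int) + 1) := by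
  have hn1 : 1 ≤ (n : Int) := by omega
  set vals := sol.map (fun x => x.2) with hv
  have hvlen : vals.length = sol.length := by simp [hv]
  set M : Nat := n - 1 with hMdef
  have hM : ((n : Int) - 1) = (M : Int) := by omega
  have hMM : M * M ≤ vals.length := by
    have : ((M * M : Nat) : Int) ≤ (vals.length : Int) := by
      push_cast
      rw [hvlen]
      calc ((M : Int) * M) = ((n:Int)-1) * ((n:Int)-1) := by rw [hM]
      _ ≤ _ := hpre
    exact_mod_cast this
  have hkey : r * M + M ≤ vals.length :=
    le_trans (by rw [← Nat.succ_mul]; exact Nat.mul_le_mul_right M (by omega)) hMM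
  -- the slice is the full chunk of length M
  have hchunk : PySem.List.slice vals (some ((r : Int) * ((n : Int) - 1)))
        (some (((r : Int) + 1) * ((n : Int) - 1)))
      = (vals.drop (r * M)).take M := by
    rw [hM]
    rw [show ((r : Int) * ((M : Nat) : Int)) = (((r * M : Nat) : Int)) by push_cast; ring]
    rw [show (((r : Int) + 1) * ((M : Nat) : Int)) = ((((r + 1) * M : Nat) : Int)) by push_cast; ring]
    rw [PySem.List.slice_natCast]
    congr 1
    rw [Nat.succ_mul]
    omega
  have hchlen : ((vals.drop (r * M)).take M).length = M := by
    rw [List.length_take, List.length_drop]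
    revert hkey
    generalize r * M = a
    intro hkey
    omega
  rw [pvRowC, pvRowA, hchunk]
  apply List.ext_getElem
  · simp only [List.length_map, PySem.List.length_enumerate, List.length_append,
      List.length_cons, List.length_nil, PySem.List.length_pyRange_one, hchlen]
    omega
  · intro p h1 h2
    have hp : p < 1 + M := by
      simp only [List.length_map, PySem.List.length_enumerate, List.length_append,
        List.length_cons, List.length_nil, hchlen] at h1
      omega
    rw [List.getElem_map, List.getElem_map, PySem.List.getElem_enumerate,
      PySem.List.getElem_pyRange_one]
    have hi0 : ¬ ((r : Int) + 1 = 0) := by omega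
    rcases Nat.eq_zero_or_pos p with hp0 | hp0
    · subst hp0
      simp only [Nat.cast_zero, add_zero]
      have hv0 : pvValA (pvNew sol) ((r : Int) + 1) (pvStart (n : Int) ((r : Int) + 1)) 0 = 0 := by
        simp [pvValA, hi0]
      rw [hv0]
      rfl
    · -- interior cell: chunk[p-1] = vals[r*M + (p-1)]
      have hplt : p - 1 < M := by omega
      have hidx : r * M + (p - 1) < vals.length := by
        revert hkey hplt
        generalize r * M = a
        intro hkey hplt
        omega
      have hgetl : ([0] ++ (vals.drop (r * M)).take M)[p]'(by simpa [hchlen] using h1)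
          = vals[r * M + (p - 1)]'hidx := by
        rw [List.getElem_append_right (by simpa using hp0)]
        simp only [List.length_cons, List.length_nil]
        rw [List.getElem_take, List.getElem_drop]
      rw [hgetl]
      have hj1 : ¬ ((0 : Int) + (p : Int) = 0) := by omega
      have hval : pvValA (pvNew sol) ((r : Int) + 1) (pvStart (n : Int) ((r : Int) + 1))
            ((0 : Int) + (p : Int))
          = vals[r * M + (p - 1)]'hidx := by
        have hstart : pvStart (n : Int) ((r : Int) + 1) = (r : Int) * ((n : Int) - 1) := by
          simp only [pvStart, if_neg hi0]
          ring_nf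
        have hno1 : ¬ ((((r : Int) + 1 = 0) : Prop) ∧ (((0 : Int) + (p : Int) = 0) : Prop)) :=
          fun h => hi0 h.1
        have hno2 : ¬ ((((r : Int) + 1 = 0) : Prop) ∨ (((0 : Int) + (p : Int) = 0) : Prop)) := by
          rintro (h | h)
          · exact hi0 h
          · exact hj1 h
        simp only [pvValA, if_neg hno1, if_neg hno2, hstart]
        have hc : (r : Int) * ((n : Int) - 1) + ((0 : Int) + (p : Int)) - 1
            = ((r * M + (p - 1) : Nat) : Int) := by
          rw [hM]; push_cast; omega
        have hcl : ((r * M + (p - 1) : Nat) : Int) < (sol.length : Int) := by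
          rw [← hvlen]; exact_mod_cast hidx
        rw [hc, pvNew_getD sol _ (by positivity) hcl]
        rw [Int.toNat_natCast, ← hv, List.getD_eq_getElem _ _ (by rw [hvlen] at hidx ⊢; exact hidx)]
      rw [hval]

lemma grid_bridge (sol : List (Int × Int)) (n : Nat) (hn : 0 < n)
    (hpre : ((n : Int) - 1) * ((n : Int) - 1) ≤ (sol.length : Int)) :
    pvGridC (sol.map (fun x => x.2)) ((n : Int) - 1) (n - 1)
      = pvGridA (pvNew sol) (n : Int) (n : Int) := by
  rw [pvGridC, pvGridA, PySem.List.pyRange_one_cons (by exact_mod_cast hn), List.flatMap_cons,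
    rowC_zero (pvNew sol) n hn]
  congr 1
  rw [show (0 : Int) + 1 = 1 by decide]
  rw [show PySem.List.pyRange 1 (n : Int) 1
        = (List.range ((n : Int) - 1).toNat).map (fun (k : Nat) => 1 + (k : Int)) by
      rw [PySem.List.pyRange_one],
    List.flatMap_map]
  have hMn : ((n : Int) - 1).toNat = n - 1 := by omega
  rw [hMn]
  apply List.flatMap_congr
  intro r hr
  have hrlt := List.mem_range.1 hr
  show pvRowC ((r : Int) + 1) _ = pvRowA (pvNew sol) (n : Int) (1 + (r : Int))
  rw [rowC_interior sol n r hrlt hpre]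
  rw [show (1 : Int) + (r : Int) = (r : Int) + 1 by ring]

lemma decode_eq_alt (sol : List (Int × Int)) (N : Int)
    (hpre : N ≤ 1 ∨ (N - 1) * (N - 1) ≤ (sol.length : Int)) :
    decode_solution sol N = decode_solution_alt sol N := by
  by_cases hN : N ≤ 0
  · have h0 : PySem.List.pyRange 0 N 1 = [] := PySem.List.pyRange_one_eq_nil hN
    simp [decode_solution, decode_solution_alt, h0, hN, PySem.Dict.empty]
  · obtain ⟨n, rfl⟩ : ∃ n : Nat, N = (n : Int) := ⟨N.toNat, by omega⟩
    have hn : 0 < n := by omega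
    have hpre' : ((n : Int) - 1) * ((n : Int) - 1) ≤ (sol.length : Int) := by
      rcases hpre with h | h
      · have : n = 1 := by omega
        subst this; simp
      · exact h
    simp only [decode_solution, decode_solution_alt, if_neg hN]
    rw [show ((PySem.List.enumerate sol 0).foldl (fun d p => d.insert p.1 p.2.2)
          PySem.Dict.empty) = pvNew sol from rfl]
    rw [outerA (pvNew sol) n n le_rfl]
    -- unfold B's dict build into outerC's shape
    rw [PySem.Dict.values_mk]
    rw [PySem.List.enumerate_cons, List.foldl_cons]
    -- header row from empty
    rw [innerC 0 _ PySem.Dict.empty (fun j hj => by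
          simp [PySem.Dict.keys, PySem.Dict.empty] at hj)]
    rw [show (PySem.Dict.empty : PySem.Dict (Int × Int) Int).items = [] from rfl,
      List.nil_append]
    rw [show (((0 : Int), [1] ++ PySem.List.pyRepeat [0] ((n : Int) - 1)) :
          Int × List Int).2 = [1] ++ PySem.List.pyRepeat [0] ((n : Int) - 1) from rfl]
    rw [show (0 : Int) + 1 = 1 by decide]
    -- enumerate of the mapped interior rows, then outerC
    rw [show PySem.List.pyRange 0 ((n : Int) - 1) 1
          = (List.range ((n : Int) - 1).toNat).map (fun (k : Nat) => 0 + (k : Int)) by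
        rw [PySem.List.pyRange_one]; norm_num]
    have hMn : ((n : Int) - 1).toNat = n - 1 := by omega
    rw [hMn, List.map_map]
    have henum : ∀ (k : Nat),
        PySem.List.enumerate ((List.range k).map
            ((fun r => [0] ++ PySem.List.slice (sol.map (fun x => x.2))
                (some (r * ((n : Int) - 1))) (some ((r + 1) * ((n : Int) - 1))))
              ∘ (fun (k : Nat) => 0 + (k : Int)))) 1
          = (List.range k).map (fun (r : Nat) => (((r : Int) + 1),
              [0] ++ PySem.List.slice (sol.map (fun x => x.2))
                (some ((r : Int) * ((n : Int) - 1))) (some (((r : Int) + 1) * ((n : Int) - 1))))) := by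
      intro k
      induction k with
      | zero => simp
      | succ k ih =>
          rw [List.range_succ, List.map_append, PySem.List.enumerate_append, ih,
            List.map_append]
          congr 1
          simp only [List.map_cons, List.map_nil, List.length_map, List.length_range,
            PySem.List.enumerate_cons, PySem.List.enumerate_nil, Function.comp_apply]
          rw [show ((0 : Int) + (k : Int)) = (k : Int) by ring]
          rw [show ((1 : Int) + (k : Int)) = (k : Int) + 1 by ring]
    rw [henum]
    rw [show PySem.Dict.mk (pvRowC 0 ([1] ++ PySem.List.pyRepeat [0] ((n : Int) - 1)))
          = PySem.Dict.mk (pvGridC (sol.map (fun x => x.2)) ((n : Int) - 1) 0) by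
        rw [pvGridC]; simp]
    rw [outerC (sol.map (fun x => x.2)) ((n : Int) - 1) (n - 1)]
    rw [grid_bridge sol n hn hpre']

-- ===== VERDICT (by name: the statement is the Claim_ definition above) =====
theorem decode_solution_spec : Claim_equal_decode_solution := by
  intro solution total_n _ hpre
  show decode_solution solution total_n = decode_solution_alt solution total_n
  exact decode_eq_alt solution total_n hpre
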